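-- pv_equiv track=rewrite | github.com/knaw-huc/hi-data-envelop-editor | scripts/tweak-automatic-labels-and-explanations.py | build_full_mapping
-- ===== SOURCE A (Python) =====
-- def build_full_mapping(column_mapping):
--     full = dict(column_mapping)
--     for v1_path, v2_path in column_mapping.items():
--         v1_parts = v1_path.split("/")
--         v2_parts = v2_path.split("/")
--         for i in range(1, min(len(v1_parts), len(v2_parts))):
--             v1_parent = "/".join(v1_parts[:-i])
--             v2_parent = "/".join(v2_parts[:-i])
--             if v1_parent and v2_parent and v1_parent not in full:
--                 full[v1_parent] = v2_parent
--     return full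
-- ===== SOURCE B (Python) =====
-- def _prefixes(path):
--     # proper '/'-prefixes of path, deepest first, built incrementally
--     parts = path.split("/")
--     out = []
--     cur = parts[0]
--     for part in parts[1:]:
--         out.append(cur)
--         cur = cur + "/" + part
--     out.reverse()
--     return out
--
--
-- def build_full_mapping(column_mapping):
--     full = dict(column_mapping)
--     for v1_path, v2_path in column_mapping.items():
--         for v1_parent, v2_parent in zip(_prefixes(v1_path), _prefixes(v2_path)):
--             if v1_parent and v2_parent and v1_parent not in full:
--                 full[v1_parent] = v2_parent
--     return full
-- ===== Notes on version B (the rewrite author's own statement) =====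
-- stated objective: alternative
-- what changed: B splits each path once and builds all '/'-prefix strings incrementally in one pass (then zips the two deepest-first prefix lists), instead of A's re-joining a slice of the parts list at every ancestor level; it trades A's per-level join for one cumulative prefix pass per path.
import Mathlib
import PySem

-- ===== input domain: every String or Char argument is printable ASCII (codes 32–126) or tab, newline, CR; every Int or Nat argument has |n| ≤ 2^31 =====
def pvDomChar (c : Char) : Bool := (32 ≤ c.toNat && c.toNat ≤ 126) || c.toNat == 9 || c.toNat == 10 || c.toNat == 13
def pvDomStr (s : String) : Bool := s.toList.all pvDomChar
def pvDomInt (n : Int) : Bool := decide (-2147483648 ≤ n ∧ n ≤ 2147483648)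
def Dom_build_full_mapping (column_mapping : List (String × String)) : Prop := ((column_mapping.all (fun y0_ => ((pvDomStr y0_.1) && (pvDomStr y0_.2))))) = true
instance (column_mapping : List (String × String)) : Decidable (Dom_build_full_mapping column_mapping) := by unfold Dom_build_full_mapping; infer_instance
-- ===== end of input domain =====

-- B builds each path's '/'-prefixes once, incrementally (deepest first), and zips the two
-- prefix lists, instead of A's per-ancestor-level re-join of prefix slices (objective: alternative).


-- ===== PORT A =====
def build_full_mapping (column_mapping : List (String × String)) : List (String × String) :=
  (column_mapping.foldl (fun full pr =>
      let v1_parts := (PySem.Str.split? pr.1 "/").getD []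
      let v2_parts := (PySem.Str.split? pr.2 "/").getD []
      (PySem.List.pyRange 1 ((min v1_parts.length v2_parts.length : Nat) : Int) 1).foldl
        (fun full i =>
          let v1_parent := PySem.Str.join "/" (PySem.List.slice v1_parts none (some (-i)))
          let v2_parent := PySem.Str.join "/" (PySem.List.slice v2_parts none (some (-i)))
          if v1_parent ≠ "" ∧ v2_parent ≠ "" ∧ full.contains v1_parent = false
          then full.insert v1_parent v2_parent else full) full)
    (PySem.Dict.ofList column_mapping)).items

-- ===== PORT B =====
-- helper _prefixes of Source B; 'cur + "/" + part' is ported on code points via toList/ofList (exact)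
def pvPrefixes (path : String) : List String :=
  match (PySem.Str.split? path "/").getD [] with
  | [] => []   -- unreachable: split with a nonempty separator never returns an empty list
  | p0 :: rest =>
    ((rest.foldl (fun (st : List String × String) part =>
        (st.1 ++ [st.2], String.ofList (st.2.toList ++ '/' :: part.toList))) ([], p0)).1).reverse

def build_full_mapping_alt (column_mapping : List (String × String)) : List (String × String) :=
  (column_mapping.foldl (fun full pr =>
      ((pvPrefixes pr.1).zip (pvPrefixes pr.2)).foldl
        (fun full ab =>
          if ab.1 ≠ "" ∧ ab.2 ≠ "" ∧ full.contains ab.1 = false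
          then full.insert ab.1 ab.2 else full) full)
    (PySem.Dict.ofList column_mapping)).items

-- ===== PRECONDITION & SPEC =====
def Spec_build_full_mapping (column_mapping : List (String × String)) (out : List (String × String)) : Prop := out = build_full_mapping_alt column_mapping
instance (column_mapping : List (String × String)) (out : List (String × String)) : Decidable (Spec_build_full_mapping column_mapping out) := by unfold Spec_build_full_mapping; infer_instance

-- ===== CLAIM (what is proved, stated in full; the proofs are below) =====
def Claim_equal_build_full_mapping : Prop := ∀ (column_mapping : List (String × String)), Dom_build_full_mapping column_mapping → Spec_build_full_mapping column_mapping (build_full_mapping column_mapping)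

-- ===== LEMMAS AND PROOFS =====

theorem pvJoinGlueC (a b : List Char) (l : List (List Char)) :
    PySem.Chars.join ['/'] ((a ++ '/' :: b) :: l) = PySem.Chars.join ['/'] (a :: b :: l) := by
  cases l with
  | nil => simp [PySem.Chars.join_singleton, PySem.Chars.join_cons_cons]
  | cons c l' => simp [PySem.Chars.join_cons_cons]

theorem pvJoinGlue (a b : String) (l : List String) :
    PySem.Str.join "/" (String.ofList (a.toList ++ '/' :: b.toList) :: l)
      = PySem.Str.join "/" (a :: b :: l) := by
  simp [PySem.Str.join]
  rw [pvJoinGlueC]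

theorem pvJoinSingleton (a : String) : PySem.Str.join "/" [a] = a := by
  simp [PySem.Str.join, PySem.Chars.join_singleton]

theorem pvPrefFold (rest : List String) : ∀ (acc : List String) (cur : String),
    (rest.foldl (fun (st : List String × String) part =>
        (st.1 ++ [st.2], String.ofList (st.2.toList ++ '/' :: part.toList))) (acc, cur)).1
      = acc ++ (List.range rest.length).map
          (fun j => PySem.Str.join "/" (cur :: rest.take j)) := by
  induction rest with
  | nil => intro acc cur; simp
  | cons p rest ih =>
    intro acc cur
    simp only [List.foldl_cons, ih, List.length_cons, List.range_succ_eq_map,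
      List.map_cons, List.map_map]
    simp only [List.take_zero, pvJoinSingleton]
    simp only [Function.comp_def, List.take_succ_cons, pvJoinGlue,
      List.append_assoc, List.singleton_append]

theorem pvPrefixes_eq (path : String) (p0 : String) (rest : List String)
    (h : (PySem.Str.split? path "/").getD [] = p0 :: rest) :
    pvPrefixes path
      = ((List.range rest.length).map
          (fun j => PySem.Str.join "/" ((p0 :: rest).take (j + 1)))).reverse := by
  unfold pvPrefixes
  rw [h]
  simp only []
  rw [pvPrefFold]
  simp only [List.nil_append, List.take_succ_cons]

theorem pvPrefixes_nil (path : String)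
    (h : (PySem.Str.split? path "/").getD [] = []) : pvPrefixes path = [] := by
  unfold pvPrefixes; rw [h]

theorem pvZipRevMap {α β : Type} (f1 : Nat → α) (f2 : Nat → β) (n1 n2 : Nat) :
    (((List.range n1).map f1).reverse).zip (((List.range n2).map f2).reverse)
      = (List.range (min n1 n2)).map (fun k => (f1 (n1 - 1 - k), f2 (n2 - 1 - k))) := by
  apply List.ext_getElem
  · simp
  · intro i h1 h2
    simp only [List.length_zip, List.length_reverse, List.length_map, List.length_range] at h1
    simp only [List.getElem_zip, List.getElem_reverse, List.getElem_map, List.getElem_range,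
      List.length_map, List.length_range]

theorem pvInnerEq (s1 s2 : String) (full : PySem.Dict String String) :
    (PySem.List.pyRange 1
        ((min ((PySem.Str.split? s1 "/").getD []).length
              ((PySem.Str.split? s2 "/").getD []).length : Nat) : Int) 1).foldl
      (fun full i =>
        let v1_parent := PySem.Str.join "/" (PySem.List.slice ((PySem.Str.split? s1 "/").getD []) none (some (-i)))
        let v2_parent := PySem.Str.join "/" (PySem.List.slice ((PySem.Str.split? s2 "/").getD []) none (some (-i)))
        if v1_parent ≠ "" ∧ v2_parent ≠ "" ∧ full.contains v1_parent = false
        then full.insert v1_parent v2_parent else full) full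
    = ((pvPrefixes s1).zip (pvPrefixes s2)).foldl
        (fun full ab =>
          if ab.1 ≠ "" ∧ ab.2 ≠ "" ∧ full.contains ab.1 = false
          then full.insert ab.1 ab.2 else full) full := by
  rcases h1 : (PySem.Str.split? s1 "/").getD [] with _ | ⟨a, as⟩
  · rw [pvPrefixes_nil s1 h1]
    rw [PySem.List.pyRange_one_eq_nil (by simp)]
    simp
  · rcases h2 : (PySem.Str.split? s2 "/").getD [] with _ | ⟨b, bs⟩
    · rw [pvPrefixes_nil s2 h2]
      rw [PySem.List.pyRange_one_eq_nil (by simp)]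
      simp
    · rw [pvPrefixes_eq s1 a as h1, pvPrefixes_eq s2 b bs h2, pvZipRevMap]
      rw [PySem.List.pyRange_one]
      have hm : ((((min (a :: as).length (b :: bs).length : Nat) : Int)) - 1).toNat
          = min as.length bs.length := by simp only [List.length_cons]; omega
      rw [hm]
      rw [List.foldl_map, List.foldl_map]
      apply PySem.List.foldl_congr_mem
      intro acc k hk
      rw [List.mem_range] at hk
      simp only []
      have e1 : -(1 + (k : Int)) = -(((k + 1 : Nat)) : Int) := by push_cast; ring
      rw [e1, PySem.List.slice_to_neg_natCast _ (k + 1) (by omega),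
        PySem.List.slice_to_neg_natCast _ (k + 1) (by omega)]
      have e2 : as.length - 1 - k + 1 = (a :: as).length - (k + 1) := by
        simp only [List.length_cons]; omega
      have e3 : bs.length - 1 - k + 1 = (b :: bs).length - (k + 1) := by
        simp only [List.length_cons]; omega
      rw [e2, e3]

-- ===== VERDICT (by name: the statement is the Claim_ definition above) =====
theorem build_full_mapping_spec : Claim_equal_build_full_mapping := by
  intro cm _
  unfold Spec_build_full_mapping build_full_mapping build_full_mapping_alt
  congr 1
  apply PySem.List.foldl_congr_mem
  intro full pr _
  exact pvInnerEq pr.1 pr.2 full
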